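-- pv_equiv track=rewrite | github.com/sasen-git/vhh-designer | archive/npz_scanner/v5_20251104/npz_fullscan_v5.py | _get_alignment_position
-- ===== SOURCE A (Python) =====
-- from typing import Dict, List, Tuple, Optional
--
-- def _get_alignment_position(aligned_seq: str, query_position: int) -> Optional[int]:
--     """
--     Convert 1-based position in original sequence to position in aligned sequence.
--     query_position is 1-based position in the original (ungapped) sequence.
--     Returns 0-based index in the aligned sequence, or None if out of range.
--     """
--     non_gap_count = 0
--     for i, char in enumerate(aligned_seq):
--         if char != '-':
--             non_gap_count += 1
--             if non_gap_count == query_position: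
--                 return i
--     return None
-- ===== SOURCE B (Python) =====
-- def _get_alignment_position(aligned_seq: str, query_position: int):
--     positions = [i for i, c in enumerate(aligned_seq) if c != '-']
--     if 1 <= query_position <= len(positions):
--         return positions[query_position - 1]
--     return None
-- ===== Notes on version B (the rewrite author's own statement) =====
-- stated objective: simpler
-- what changed: Replaced the interleaved counter-with-early-return scan by a build-then-index decomposition: collect all non-gap indices once, then bounds-check and index directly.
import Mathlib
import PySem

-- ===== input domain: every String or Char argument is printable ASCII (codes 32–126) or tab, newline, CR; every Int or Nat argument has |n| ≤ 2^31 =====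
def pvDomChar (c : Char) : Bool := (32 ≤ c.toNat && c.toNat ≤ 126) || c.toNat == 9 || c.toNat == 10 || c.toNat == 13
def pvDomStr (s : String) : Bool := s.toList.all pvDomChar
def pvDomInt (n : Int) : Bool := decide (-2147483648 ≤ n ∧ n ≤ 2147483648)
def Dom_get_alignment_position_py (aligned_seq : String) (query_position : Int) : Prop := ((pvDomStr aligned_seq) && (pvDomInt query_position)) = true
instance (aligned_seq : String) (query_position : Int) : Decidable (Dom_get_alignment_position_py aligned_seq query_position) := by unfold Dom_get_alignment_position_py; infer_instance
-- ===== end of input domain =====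

-- B replaces A's interleaved counter-with-early-return scan by build-then-index (simpler decomposition); return values proved equal.

-- ===== PORT A =====
-- A's loop: enumerate with index i, running non-gap count, early return on hit.
def pvLoopA (q : Int) : List Char → Int → Int → Option Int
  | [], _, _ => none
  | c :: cs, i, cnt =>
      if c ≠ '-' then
        if cnt + 1 = q then some i else pvLoopA q cs (i + 1) (cnt + 1)
      else pvLoopA q cs (i + 1) cnt

def get_alignment_position_py (aligned_seq : String) (query_position : Int) : Option Int :=
  pvLoopA query_position aligned_seq.toList 0 0

-- ===== PORT B =====
-- B's comprehension: all aligned indices whose character is not a gap.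
def pvPositions : List Char → Int → List Int
  | [], _ => []
  | c :: cs, i => if c ≠ '-' then i :: pvPositions cs (i + 1) else pvPositions cs (i + 1)

def get_alignment_position_py_alt (aligned_seq : String) (query_position : Int) : Option Int :=
  let ps := pvPositions aligned_seq.toList 0
  -- guard makes the index in range, so positions[query_position-1] is exactly this `some`
  if 1 ≤ query_position ∧ query_position ≤ ps.length then ps[(query_position - 1).toNat]? else none

-- ===== PRECONDITION & SPEC =====
def Spec_get_alignment_position_py (aligned_seq : String) (query_position : Int) (out : Option Int) : Prop := out = get_alignment_position_py_alt aligned_seq query_position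
instance (aligned_seq : String) (query_position : Int) (out : Option Int) : Decidable (Spec_get_alignment_position_py aligned_seq query_position out) := by unfold Spec_get_alignment_position_py; infer_instance

-- ===== CLAIM (what is proved, stated in full; the proofs are below) =====
def Claim_equal_get_alignment_position_py : Prop := ∀ (aligned_seq : String) (query_position : Int), Dom_get_alignment_position_py aligned_seq query_position → Spec_get_alignment_position_py aligned_seq query_position (get_alignment_position_py aligned_seq query_position)

-- ===== LEMMAS AND PROOFS =====
lemma pvLoopA_eq (q : Int) (cs : List Char) : ∀ (i cnt : Int),
    pvLoopA q cs i cnt =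
      if 1 ≤ q - cnt then (pvPositions cs i)[(q - cnt - 1).toNat]? else none := by
  induction cs with
  | nil => intro i cnt; simp [pvLoopA, pvPositions]
  | cons c cs ih =>
      intro i cnt
      by_cases hc : c ≠ '-'
      · simp only [pvLoopA, pvPositions, if_pos hc]
        by_cases hq : cnt + 1 = q
        · have h1 : (1:Int) ≤ q - cnt := by omega
          have h0 : (q - cnt - 1).toNat = 0 := by omega
          simp [hq, h1, h0]
        · rw [if_neg hq, ih]
          by_cases h1 : 1 ≤ q - (cnt + 1)
          · have h2 : (1:Int) ≤ q - cnt := by omega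
            have hk : (q - cnt - 1).toNat = (q - (cnt + 1) - 1).toNat + 1 := by omega
            simp [h1, h2, hk]
          · have h2 : ¬ (1:Int) ≤ q - cnt := by omega
            simp [h1, h2]
      · simp only [pvLoopA, pvPositions, if_neg hc]
        exact ih (i + 1) cnt

lemma pvPositions_getElem?_none (ps : List Int) (q : Int) (h : ps.length < q) :
    ps[(q - 1).toNat]? = none := by
  apply List.getElem?_eq_none
  omega

-- ===== VERDICT (by name: the statement is the Claim_ definition above) =====
theorem get_alignment_position_py_spec : Claim_equal_get_alignment_position_py := by
  intro s q _
  unfold Spec_get_alignment_position_py get_alignment_position_py get_alignment_position_py_alt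
  rw [pvLoopA_eq]
  simp only [Int.sub_zero]
  by_cases h1 : (1:Int) ≤ q
  · by_cases h2 : q ≤ (pvPositions s.toList 0).length
    · simp [h1, h2]
    · rw [if_pos h1, if_neg (by exact fun h => h2 h.2)]
      exact pvPositions_getElem?_none _ _ (by omega)
  · simp [h1]
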